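-- pv_equiv track=rewrite | github.com/siddhanth78/JOEMAMA | joemama.py | check_cmd
-- ===== SOURCE A (Python) =====
-- def check_cmd(command, cmdlist):
--     cmdli = []
--     for c in cmdlist:
--         if c.startswith(command):
--             cmdli.append(c)
--     others = [x for x in cmdlist if x not in cmdli and command in x]
--     cmdli.sort()
--     cmdli.extend(others)
--     return cmdli
-- ===== SOURCE B (Python) =====
-- def check_cmd(command, cmdlist):
--     starts = []
--     contains = []
--     for c in cmdlist:
--         if c.startswith(command):
--             starts.append(c)
--         elif command in c:
--             contains.append(c)
--     return sorted(starts) + contains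
-- ===== Notes on version B (the rewrite author's own statement) =====
-- stated objective: simpler
-- what changed: Replaces A's first loop plus a second re-scanning comprehension with a list-membership test by a single partitioning pass into `starts`/`contains`, returning sorted(starts) + contains.
import Mathlib
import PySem

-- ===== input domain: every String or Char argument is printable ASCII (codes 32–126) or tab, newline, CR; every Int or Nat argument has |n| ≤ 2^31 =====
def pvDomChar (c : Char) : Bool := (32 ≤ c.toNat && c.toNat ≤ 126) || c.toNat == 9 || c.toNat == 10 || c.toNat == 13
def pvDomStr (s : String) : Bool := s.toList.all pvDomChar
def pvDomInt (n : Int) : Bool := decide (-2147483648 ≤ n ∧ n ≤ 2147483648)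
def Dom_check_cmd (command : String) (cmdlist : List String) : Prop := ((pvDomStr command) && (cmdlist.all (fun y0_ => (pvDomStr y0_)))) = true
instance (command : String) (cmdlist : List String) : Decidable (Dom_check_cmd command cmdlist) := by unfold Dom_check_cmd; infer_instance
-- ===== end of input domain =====

-- B replaces A's loop plus re-scanning comprehension (with its list-membership test) by one
-- partitioning pass into `starts`/`contains`, returning sorted(starts) + contains (simpler).

-- ===== PORT A =====
def check_cmd (command : String) (cmdlist : List String) : List String :=
  let cmdli := cmdlist.foldl (fun acc c =>
    if PySem.Str.startswith c command then acc ++ [c] else acc) []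
  let others := cmdlist.filter (fun x =>
    !(cmdli.contains x) && PySem.Str.isIn command x)
  (PySem.List.sorted cmdli (fun x => x) false) ++ others

-- ===== PORT B =====
def check_cmd_alt (command : String) (cmdlist : List String) : List String :=
  let p := cmdlist.foldl (fun (p : List String × List String) c =>
    if PySem.Str.startswith c command then (p.1 ++ [c], p.2)
    else if PySem.Str.isIn command c then (p.1, p.2 ++ [c])
    else p) ([], [])
  (PySem.List.sorted p.1 (fun x => x) false) ++ p.2

-- ===== PRECONDITION & SPEC =====
def Spec_check_cmd (command : String) (cmdlist : List String) (out : List String) : Prop := out = check_cmd_alt command cmdlist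
instance (command : String) (cmdlist : List String) (out : List String) : Decidable (Spec_check_cmd command cmdlist out) := by unfold Spec_check_cmd; infer_instance

-- ===== CLAIM (what is proved, stated in full; the proofs are below) =====
def Claim_equal_check_cmd : Prop := ∀ (command : String) (cmdlist : List String), Dom_check_cmd command cmdlist → Spec_check_cmd command cmdlist (check_cmd command cmdlist)

-- ===== LEMMAS AND PROOFS =====

-- A's accumulating loop is filtering (stated over List Char to match the simp-normal form).
theorem pvFoldA (cmd : List Char) (l : List String) (acc : List String) :
    l.foldl (fun acc c => if PySem.Chars.startswith c.toList cmd then acc ++ [c] else acc) acc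
      = acc ++ l.filter (fun c => PySem.Chars.startswith c.toList cmd) := by
  induction l generalizing acc with
  | nil => simp
  | cons h t ih =>
    simp only [List.foldl_cons, List.filter_cons]
    by_cases hs : PySem.Chars.startswith h.toList cmd = true <;> simp [hs, ih]

-- B's partitioning loop builds the two filtered lists.
theorem pvFoldB (cmd : List Char) (l : List String) (a b : List String) :
    l.foldl (fun (p : List String × List String) c =>
      if PySem.Chars.startswith c.toList cmd then (p.1 ++ [c], p.2)
      else if PySem.Chars.isIn cmd c.toList then (p.1, p.2 ++ [c])
      else p) (a, b)
    = (a ++ l.filter (fun c => PySem.Chars.startswith c.toList cmd),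
       b ++ l.filter (fun c => !(PySem.Chars.startswith c.toList cmd) && PySem.Chars.isIn cmd c.toList)) := by
  induction l generalizing a b with
  | nil => simp
  | cons h t ih =>
    simp only [List.foldl_cons, List.filter_cons]
    by_cases hs : PySem.Chars.startswith h.toList cmd = true
    · simp [hs, ih]
    · by_cases hi : PySem.Chars.isIn cmd h.toList = true <;>
        simp [hs, hi, ih]

-- Str-form wrappers (defeq to the Chars-form lemmas; match the ports syntactically).
theorem pvFoldA' (command : String) (l : List String) (acc : List String) :
    l.foldl (fun acc c => if PySem.Str.startswith c command then acc ++ [c] else acc) acc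
      = acc ++ l.filter (fun c => PySem.Chars.startswith c.toList command.toList) :=
  pvFoldA command.toList l acc

theorem pvFoldB' (command : String) (l : List String) (a b : List String) :
    l.foldl (fun (p : List String × List String) c =>
      if PySem.Str.startswith c command then (p.1 ++ [c], p.2)
      else if PySem.Str.isIn command c then (p.1, p.2 ++ [c])
      else p) (a, b)
    = (a ++ l.filter (fun c => PySem.Chars.startswith c.toList command.toList),
       b ++ l.filter (fun c => !(PySem.Chars.startswith c.toList command.toList) && PySem.Chars.isIn command.toList c.toList)) :=
  pvFoldB command.toList l a b

-- ===== VERDICT (by name: the statement is the Claim_ definition above) =====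
theorem check_cmd_spec : Claim_equal_check_cmd := by
  intro command cmdlist _
  unfold Spec_check_cmd check_cmd check_cmd_alt
  rw [pvFoldA', pvFoldB']
  simp only [List.nil_append]
  congr 1
  apply List.filter_congr
  intro x hx
  by_cases hs : PySem.Chars.startswith x.toList command.toList = true
  · simp [hs, List.mem_filter, hx]
  · simp [hs, List.mem_filter, hx]
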